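-- pv_equiv track=rewrite | github.com/pascalcharp/6_006_Spring_2020 | problem_set_2/porkland.py | calculer_dommages_special
-- ===== SOURCE A (Python) =====
-- def calculer_dommages_special(briques):
--     """
--     Calcule le dommage de chaque maison en présupposant qu'au maximum UNE SEULE maison n'est pas spéciale.
--     Rappel : une maison est spéciale si elle n'a pas de voisin à droite, ou si sa voisine de droite lui est strictement
--     supérieure.
--     Args :
--         briques (int list) : Nombre de brique pour chaque maison d'ouest en est
--     Returns :
--         int list : le dommage résultant pour chaque maison
--     Precondition : Il existe UNE et UNE SEULE maison dans briques qui n'est pas spéciale.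
--     """
--     assert len(briques) > 1
--     dommage = [1 for _ in range(len(briques))]
--     ordinaire = None
--     maison_ordinaire_trouvee = False
--     for i in range(len(briques) - 1):
--         if briques[i] > briques[i + 1]:
--             ordinaire = i
--             maison_ordinaire_trouvee = True
--     assert maison_ordinaire_trouvee
--     i = 0
--     dommage_courant = 1
--     j = ordinaire + 1
--     while i < ordinaire + 1:
--         if j == len(briques) or briques[i] <= briques[j]:
--             dommage[i] = dommage_courant
--             i += 1
--         elif j < len(briques):
--             dommage_courant += 1
--             j += 1
--     return dommage
-- ===== SOURCE B (Python) =====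
-- def calculer_dommages_special(briques):
--     n = len(briques)
--     assert n > 1
--     desc = [i for i in range(n - 1) if briques[i] > briques[i + 1]]
--     assert desc
--     ordinaire = desc[-1]
--     dommage = [1] * n
--     m = briques[0]
--     for i in range(ordinaire + 1):
--         if briques[i] > m:
--             m = briques[i]
--         k = ordinaire + 1
--         while k < n and briques[k] < m:
--             k += 1
--         dommage[i] = 1 + (k - (ordinaire + 1))
--     return dommage
-- ===== Notes on version B (the rewrite author's own statement) =====
-- stated objective: alternative
-- what changed: A's single while-loop merges prefix and suffix with a persistent advancing pointer j and a running dommage_courant; B instead keeps a running prefix maximum and, for each house up to the last ordinary one, does a fresh scan of the suffix for the first house with at least that many bricks.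
import Mathlib
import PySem

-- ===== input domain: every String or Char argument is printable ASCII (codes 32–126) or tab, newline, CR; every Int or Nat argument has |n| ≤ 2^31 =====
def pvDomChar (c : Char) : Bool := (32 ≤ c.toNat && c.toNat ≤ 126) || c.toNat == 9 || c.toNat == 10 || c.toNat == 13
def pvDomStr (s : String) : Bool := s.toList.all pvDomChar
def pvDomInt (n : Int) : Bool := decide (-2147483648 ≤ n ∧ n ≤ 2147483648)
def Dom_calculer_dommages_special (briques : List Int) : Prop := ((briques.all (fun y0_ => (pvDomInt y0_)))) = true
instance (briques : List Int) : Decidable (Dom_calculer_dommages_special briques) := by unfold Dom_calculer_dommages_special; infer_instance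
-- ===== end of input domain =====

-- B replaces A's persistent two-pointer merge by a per-house scan of the suffix with a running
-- prefix maximum; same return value wherever A returns (objective: alternative, not faster).

-- ===== PORT A =====
-- A's first pass: fold over range(len-1) recording the last descent index and a found flag
def findOrdinaireA (briques : List Int) : Option Int × Bool :=
  (PySem.List.pyRange 0 ((briques.length : Int) - 1) 1).foldl
    (fun s i =>
      if PySem.List.pyGetD briques i 0 > PySem.List.pyGetD briques (i + 1) 0 then (some i, true)
      else s)
    (none, false)

-- A's while-loop: advancing pointers i, j and the running dommage_courant dc
def loopA (briques : List Int) (ord i j dc : Int) (dom : List Int) : List Int :=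
  if hi : i < ord + 1 then
    if j = (briques.length : Int) ∨ PySem.List.pyGetD briques i 0 ≤ PySem.List.pyGetD briques j 0 then
      loopA briques ord (i + 1) j dc (PySem.List.pySetD dom i dc)
    else if hj : j < (briques.length : Int) then
      loopA briques ord i (j + 1) (dc + 1) dom
    else dom   -- unreachable from A's initial state (j ≤ len always holds; Python would spin here)
  else dom
termination_by ((ord + 1 - i).toNat + ((briques.length : Int) - j).toNat)
decreasing_by · omega
              · omega

def calculer_dommages_special (briques : List Int) : List Int :=
  if 1 < briques.length then
    match findOrdinaireA briques with
    | (some ord, true) => loopA briques ord 0 (ord + 1) 1 (List.replicate briques.length 1)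
    | _ => []   -- assert maison_ordinaire_trouvee fails (excluded by Pre_)
  else []       -- assert len(briques) > 1 fails (excluded by Pre_)

-- ===== PORT B =====
-- B's inner while: first suffix position k ≥ start whose house holds at least m bricks
def skipB (briques : List Int) (m k : Int) : Int :=
  if h : k < (briques.length : Int) ∧ PySem.List.pyGetD briques k 0 < m then
    skipB briques m (k + 1)
  else k
termination_by ((briques.length : Int) - k).toNat
decreasing_by omega

-- B's for-loop: running prefix maximum m, fresh suffix scan for every house i
def loopB (briques : List Int) (ord i m : Int) (dom : List Int) : List Int :=
  if hi : i < ord + 1 then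
    let m' := if PySem.List.pyGetD briques i 0 > m then PySem.List.pyGetD briques i 0 else m
    let k := skipB briques m' (ord + 1)
    loopB briques ord (i + 1) m' (PySem.List.pySetD dom i (1 + (k - (ord + 1))))
  else dom
termination_by (ord + 1 - i).toNat
decreasing_by omega

def calculer_dommages_special_alt (briques : List Int) : List Int :=
  if 1 < briques.length then
    match ((PySem.List.pyRange 0 ((briques.length : Int) - 1) 1).filter
      (fun i => decide (PySem.List.pyGetD briques i 0 > PySem.List.pyGetD briques (i + 1) 0))).getLast? with
    | some ordinaire =>
        loopB briques ordinaire 0 (PySem.List.pyGetD briques 0 0) (List.replicate briques.length 1)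
    | none => []   -- assert desc fails (excluded by Pre_)
  else []          -- assert n > 1 fails (excluded by Pre_)

-- ===== PRECONDITION & SPEC =====
-- Pre_ excludes exactly the inputs on which A's two asserts raise AssertionError:
-- lists of length ≤ 1, and lists with no adjacent strict descent.
def Pre_calculer_dommages_special (briques : List Int) : Prop :=
  1 < briques.length ∧
    ∃ i ∈ List.range (briques.length - 1), briques.getD (i + 1) 0 < briques.getD i 0
instance (briques : List Int) : Decidable (Pre_calculer_dommages_special briques) := by
  unfold Pre_calculer_dommages_special; infer_instance

def pvWitness_calculer_dommages_special : List Int := [1, 3, 2, 4]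

def Spec_calculer_dommages_special (briques : List Int) (out : List Int) : Prop :=
  out = calculer_dommages_special_alt briques
instance (briques : List Int) (out : List Int) : Decidable (Spec_calculer_dommages_special briques out) := by
  unfold Spec_calculer_dommages_special; infer_instance

-- ===== CLAIM (what is proved, stated in full; the proofs are below) =====
def Claim_equal_calculer_dommages_special : Prop :=
  ∀ (briques : List Int), Dom_calculer_dommages_special briques →
    Pre_calculer_dommages_special briques →
      Spec_calculer_dommages_special briques (calculer_dommages_special briques)

-- ===== LEMMAS AND PROOFS =====

-- A's fold over the index range keeps the LAST index passing the test: it equals the last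
-- element of the filtered range (with the found flag true exactly when one exists).
lemma foldl_last_filter (p : Int → Prop) [DecidablePred p] (l : List Int) (s : Option Int × Bool) :
    l.foldl (fun s i => if p i then (some i, true) else s) s
      = ((l.filter (fun i => decide (p i))).getLast?).elim s (fun x => (some x, true)) := by
  induction l generalizing s with
  | nil => rfl
  | cons a l ih =>
    by_cases h : p a
    · simp only [List.foldl_cons, List.filter_cons, if_pos h, decide_eq_true h, ih]
      cases hr : (l.filter (fun i => decide (p i))).getLast? with
      | none =>
        have : l.filter (fun i => decide (p i)) = [] := List.getLast?_eq_none_iff.mp hr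
        simp [this]
      | some x =>
        simp [List.getLast?_cons, hr]
    · simp only [List.foldl_cons, List.filter_cons, if_neg h, decide_eq_false h, ih]
      simp

lemma skipB_ge (briques : List Int) (m k : Int) : k ≤ skipB briques m k := by
  fun_induction skipB briques m k with
  | case1 k h ih => omega
  | case2 k h => omega

lemma skipB_le (briques : List Int) (m k : Int) (hk : k ≤ (briques.length : Int)) :
    skipB briques m k ≤ (briques.length : Int) := by
  fun_induction skipB briques m k with
  | case1 k h ih => exact ih (by omega)
  | case2 k h => omega

lemma skipB_below (briques : List Int) (m k : Int) :
    ∀ x, k ≤ x → x < skipB briques m k → PySem.List.pyGetD briques x 0 < m := by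
  fun_induction skipB briques m k with
  | case1 k h ih =>
    intro x hx1 hx2
    rcases eq_or_lt_of_le hx1 with rfl | hlt
    · exact h.2
    · exact ih x (by omega) hx2
  | case2 k h =>
    intro x hx1 hx2; omega

lemma skipB_stop (briques : List Int) (m k : Int) (hk : k ≤ (briques.length : Int)) :
    skipB briques m k = (briques.length : Int) ∨
      m ≤ PySem.List.pyGetD briques (skipB briques m k) 0 := by
  fun_induction skipB briques m k with
  | case1 k h ih => exact ih (by omega)
  | case2 k h =>
    rw [not_and_or] at h
    rcases h with h | h
    · left; omega
    · right; omega

lemma skipB_congr (briques : List Int) (m a j : Int) (haj : a ≤ j)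
    (hjn : j ≤ (briques.length : Int))
    (hbelow : ∀ x, a ≤ x → x < j → PySem.List.pyGetD briques x 0 < m) :
    skipB briques m a = skipB briques m j := by
  obtain ⟨d, hd⟩ : ∃ d : Nat, (d : Int) = j - a := ⟨(j - a).toNat, by omega⟩
  induction d generalizing a with
  | zero =>
    have haj' : a = j := by omega
    rw [haj']
  | succ d ih =>
    have ha : a < j := by omega
    rw [skipB, dif_pos ⟨by omega, hbelow a le_rfl ha⟩]
    exact ih (a + 1) (by omega) (fun x h1 h2 => hbelow x (by omega) h2) (by omega)

-- A's loop, while stuck on house i, just advances j past the suffix houses smaller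
-- than briques[i], adding the advance to dc: it reaches skipB in one jump.
lemma loopA_skip (briques : List Int) (ord i : Int) (hi : i < ord + 1) :
    ∀ j dc dom, j ≤ (briques.length : Int) →
      loopA briques ord i j dc dom
        = loopA briques ord i (skipB briques (PySem.List.pyGetD briques i 0) j)
            (dc + (skipB briques (PySem.List.pyGetD briques i 0) j - j)) dom := by
  intro j dc dom hj
  obtain ⟨d, hd⟩ : ∃ d : Nat, (d : Int) = (briques.length : Int) - j :=
    ⟨((briques.length : Int) - j).toNat, by omega⟩
  induction d generalizing j dc with
  | zero =>
    have hjn : j = (briques.length : Int) := by omega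
    have : skipB briques (PySem.List.pyGetD briques i 0) j = j := by
      rw [skipB, dif_neg (by omega)]
    rw [this]; ring_nf
  | succ d ih =>
    by_cases hc : j = (briques.length : Int) ∨
        PySem.List.pyGetD briques i 0 ≤ PySem.List.pyGetD briques j 0
    · have : skipB briques (PySem.List.pyGetD briques i 0) j = j := by
        rw [skipB, dif_neg (by omega)]
      rw [this]; ring_nf
    · have hjlt : j < (briques.length : Int) := by omega
      have hstep : loopA briques ord i j dc dom = loopA briques ord i (j + 1) (dc + 1) dom := by
        rw [loopA, dif_pos hi, if_neg hc, dif_pos hjlt]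
      have hskip : skipB briques (PySem.List.pyGetD briques i 0) j
          = skipB briques (PySem.List.pyGetD briques i 0) (j + 1) := by
        rw [skipB, dif_pos ⟨hjlt, by omega⟩]
      rw [hstep, hskip, ih (j + 1) (dc + 1) (by omega) (by omega)]
      ring_nf

-- Invariant tying A's pointer j to B's running maximum m (entering the iteration for house i):
-- everything strictly between the suffix start and j is below m, and j sits on a house ≥ m
-- (or at the end, or nothing has been scanned yet and m is briques[i]).
lemma loop_eq (briques : List Int) (ord : Int) :
    ∀ i m j dom, 0 ≤ i → i ≤ ord + 1 → ord + 1 ≤ j → j ≤ (briques.length : Int) →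
      (∀ x, ord + 1 ≤ x → x < j → PySem.List.pyGetD briques x 0 < m) →
      (j = (briques.length : Int) ∨ m ≤ PySem.List.pyGetD briques j 0 ∨
        (j = ord + 1 ∧ m = PySem.List.pyGetD briques i 0)) →
      loopA briques ord i j (1 + (j - (ord + 1))) dom = loopB briques ord i m dom := by
  intro i m j dom hi0 hi hj1 hj2 hbelow hstop
  obtain ⟨d, hd⟩ : ∃ d : Nat, (d : Int) = ord + 1 - i := ⟨(ord + 1 - i).toNat, by omega⟩
  induction d generalizing i m j dom with
  | zero =>
    have hie : ¬ i < ord + 1 := by omega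
    rw [loopA, dif_neg hie, loopB, dif_neg hie]
  | succ d ih =>
    have hilt : i < ord + 1 := by omega
    set t := PySem.List.pyGetD briques i 0 with ht
    set m' := if t > m then t else m with hm'
    set k := skipB briques m' (ord + 1) with hk
    -- A's skipping phase lands exactly on B's fresh scan with the updated maximum
    have hkey : skipB briques t j = k := by
      by_cases htm : t > m
      · have : m' = t := by rw [hm', if_pos htm]
        rw [hk, this]
        exact (skipB_congr briques t (ord + 1) j hj1 hj2
          (fun x h1 h2 => lt_trans (hbelow x h1 h2) htm)).symm
      · have hm'm : m' = m := by rw [hm', if_neg htm]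
        have hj_eq : skipB briques t j = skipB briques m j := by
          rcases hstop with hn | hm | ⟨hje, hme⟩
          · rw [skipB, dif_neg (by omega), skipB, dif_neg (by omega)]
          · rw [skipB, dif_neg (by omega), skipB, dif_neg (by omega)]
          · rw [hme, ht]
        rw [hj_eq, hk, hm'm]
        exact (skipB_congr briques m (ord + 1) j hj1 hj2 hbelow).symm
    have hkge : ord + 1 ≤ k := hk ▸ skipB_ge briques m' (ord + 1)
    have hkle : k ≤ (briques.length : Int) := hk ▸ skipB_le briques m' (ord + 1) (by omega)
    have hkstop : k = (briques.length : Int) ∨ m' ≤ PySem.List.pyGetD briques k 0 :=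
      hk ▸ skipB_stop briques m' (ord + 1) (by omega)
    have htm' : t ≤ m' := by rw [hm']; split <;> omega
    -- one full iteration of A (skip phase + placement) …
    have hA : loopA briques ord i j (1 + (j - (ord + 1))) dom
        = loopA briques ord (i + 1) k (1 + (k - (ord + 1)))
            (PySem.List.pySetD dom i (1 + (k - (ord + 1)))) := by
      rw [loopA_skip briques ord i hilt j _ dom hj2, hkey]
      have harith : 1 + (j - (ord + 1)) + (k - j) = 1 + (k - (ord + 1)) := by ring
      rw [harith, loopA, dif_pos hilt, if_pos (by omega)]
    -- … equals one iteration of B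
    have hB : loopB briques ord i m dom
        = loopB briques ord (i + 1) m' (PySem.List.pySetD dom i (1 + (k - (ord + 1)))) := by
      rw [loopB, dif_pos hilt]
    rw [hA, hB]
    exact ih (i + 1) m' k _ (by omega) (by omega) hkge hkle
      (fun x h1 h2 => skipB_below briques m' (ord + 1) x h1 (hk ▸ h2))
      (hkstop.imp id Or.inl)
      (by omega)

-- ===== VERDICT (by name: the statement is the Claim_ definition above) =====
theorem calculer_dommages_special_spec : Claim_equal_calculer_dommages_special := by
  intro briques _ hpre
  obtain ⟨hlen, i0, hi0, hdesc⟩ := hpre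
  set pred : Int → Prop :=
    (fun i => PySem.List.pyGetD briques i 0 > PySem.List.pyGetD briques (i + 1) 0) with hpred
  set desc := (PySem.List.pyRange 0 ((briques.length : Int) - 1) 1).filter
    (fun i => decide (pred i)) with hdescdef
  -- the witness descent puts (i0 : Int) into desc, so desc is nonempty
  have hi0lt : i0 < briques.length - 1 := List.mem_range.mp hi0
  have hmem : (i0 : Int) ∈ desc := by
    rw [hdescdef]
    apply List.mem_filter.mpr
    refine ⟨PySem.List.mem_pyRange_one.mpr ⟨by omega, by omega⟩, ?_⟩
    have h1 : PySem.List.pyGetD briques (i0 : Int) 0 = briques.getD i0 0 :=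
      PySem.List.pyGetD_natCast briques i0 0
    have h2 : PySem.List.pyGetD briques ((i0 : Int) + 1) 0 = briques.getD (i0 + 1) 0 := by
      have h3 := PySem.List.pyGetD_natCast briques (i0 + 1) 0
      push_cast at h3
      exact h3
    apply decide_eq_true
    show PySem.List.pyGetD briques (i0 : Int) 0 > PySem.List.pyGetD briques ((i0 : Int) + 1) 0
    rw [h1, h2]
    exact hdesc
  have hne : desc ≠ [] := List.ne_nil_of_mem hmem
  obtain ⟨ord, hord⟩ : ∃ ord, desc.getLast? = some ord := by
    cases h : desc.getLast? with
    | none => exact absurd (List.getLast?_eq_none_iff.mp h) hne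
    | some x => exact ⟨x, rfl⟩
  -- ord is a valid index: it came from the filtered range
  have hordmem : ord ∈ desc := List.mem_of_getLast? hord
  have hordrange : (0 : Int) ≤ ord ∧ ord < (briques.length : Int) - 1 :=
    PySem.List.mem_pyRange_one.mp (List.mem_of_mem_filter (hdescdef ▸ hordmem))
  have hordfold : findOrdinaireA briques = (some ord, true) := by
    unfold findOrdinaireA
    rw [foldl_last_filter pred, ← hdescdef, hord]
    rfl
  unfold Spec_calculer_dommages_special calculer_dommages_special calculer_dommages_special_alt
  rw [if_pos hlen, if_pos hlen, hordfold, ← hdescdef, hord]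
  have hle := loop_eq briques ord 0 (PySem.List.pyGetD briques 0 0) (ord + 1)
    (List.replicate briques.length 1)
    le_rfl (by omega) le_rfl (by omega)
    (fun x hx1 hx2 => absurd (lt_of_le_of_lt hx1 hx2) (lt_irrefl _))
    (Or.inr (Or.inr ⟨rfl, rfl⟩))
  rw [show (1 + ((ord : Int) + 1 - (ord + 1))) = 1 from by ring] at hle
  exact hle
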